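-- pv_equiv track=rewrite | github.com/skanjila/beautiful_dsa_algos_coding_interviews | beautiful_dsa_algos_coding_interviews/strings/generate_anagrams.py | generate_anagrams
-- ===== SOURCE A (Python) =====
-- from typing import List
--
-- def generate_anagrams(input_str: str)->List[str]:
--     """Given an input string generate all the possible anagrams
--     @param input_str: input string
--     @return: list of all possible anagrams"""
--     anagrams = []
--
--     if not input_str:
--         return [""]
--
--     sorted_input_str = sorted(input_str)  # sorting enables the duplicate-skip trick
--     length_of_input_str = len(sorted_input_str)
--     used = [False] * length_of_input_str
--     path = []
--     results=[]
--
--     def backtrack():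
--         if len(path) == length_of_input_str:
--             results.append("".join(path))
--
--         for i in range(length_of_input_str):
--             if used[i]:
--                 continue
--             if i > 0 and sorted_input_str[i] == sorted_input_str[i - 1] and not used[i - 1]:
--                 continue
--             used[i] = True
--             path.append(sorted_input_str[i])
--             backtrack()
--             path.pop()
--             used[i] = False
--
--     backtrack()
--     return results
-- ===== SOURCE B (Python) =====
-- from typing import List
--
-- def generate_anagrams(input_str: str) -> List[str]:
--     """Given an input string generate all the possible anagrams
--     @param input_str: input string
--     @return: list of all possible anagrams"""
--
--     def rle(chars):
--         # run-length encode a list of characters into [char, count] pairs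
--         if not chars:
--             return []
--         rest = rle(chars[1:])
--         if rest and rest[0][0] == chars[0]:
--             return [[chars[0], rest[0][1] + 1]] + rest[1:]
--         return [[chars[0], 1]] + rest
--
--     counts = rle(sorted(input_str))
--     path = []
--     results = []
--
--     def backtrack(remaining):
--         if remaining == 0:
--             results.append("".join(path))
--             return
--         for entry in counts:
--             if entry[1] > 0:
--                 entry[1] -= 1
--                 path.append(entry[0])
--                 backtrack(remaining - 1)
--                 path.pop()
--                 entry[1] += 1
--
--     backtrack(len(input_str))
--     return results
-- ===== Notes on version B (the rewrite author's own statement) =====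
-- stated objective: alternative
-- what changed: B replaces A's used[]-boolean-mask backtracking over all n positions of the sorted string (with a duplicate-skip test against the previous position) by backtracking over a run-length-encoded (char, count) list, decrementing and restoring counts, so the per-node loop runs over distinct runs instead of all positions and needs no skip test.
import Mathlib
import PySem

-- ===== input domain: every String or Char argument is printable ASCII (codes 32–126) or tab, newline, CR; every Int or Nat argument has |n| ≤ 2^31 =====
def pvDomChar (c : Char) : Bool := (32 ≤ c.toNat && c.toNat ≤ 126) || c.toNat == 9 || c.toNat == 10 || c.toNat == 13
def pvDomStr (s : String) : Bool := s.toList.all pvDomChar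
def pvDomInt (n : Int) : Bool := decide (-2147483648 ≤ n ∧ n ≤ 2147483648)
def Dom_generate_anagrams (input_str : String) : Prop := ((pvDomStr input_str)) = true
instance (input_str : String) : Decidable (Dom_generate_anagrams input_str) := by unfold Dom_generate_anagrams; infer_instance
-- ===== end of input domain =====

-- B replaces A's used[]-mask backtracking over the sorted characters by backtracking over a
-- run-length-encoded (char, count) list, decrementing counts; same output, alternative structure.

-- ===== PORT A =====
-- A's nested `backtrack` closure; `fuel` is only a totality device (recursion depth bound,
-- never exhausted on the actual calls).
mutual
def pvBackA (fuel : Nat) (s : List Char) (used : List Bool) (path : List Char) (res : List String) : List String :=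
  match fuel with
  | 0 => res
  | Nat.succ f =>
    let res' := if path.length = s.length then res ++ [String.ofList path] else res
    pvLoopA f s used path 0 res'
termination_by (2 * fuel, 0)

def pvLoopA (fuel : Nat) (s : List Char) (used : List Bool) (path : List Char) (i : Nat) (res : List String) : List String :=
  if h : i < s.length then
    let r :=
      if used.getD i false then res
      else if 0 < i ∧ s.getD i ' ' = s.getD (i - 1) ' ' ∧ used.getD (i - 1) false = false then res
      else pvBackA fuel s (used.set i true) (path ++ [s.getD i ' ']) res
    pvLoopA fuel s used path (i + 1) r
  else res
termination_by (2 * fuel + 1, s.length - i)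
end

def generate_anagrams (input_str : String) : List String :=
  if input_str.toList = [] then [""]
  else
    let s := PySem.List.sorted input_str.toList (fun c => c) false
    pvBackA (s.length + 1) s (List.replicate s.length false) [] []

-- ===== PORT B =====
-- Source B's recursive run-length encoder
def pvRLE : List Char → List (Char × Nat)
  | [] => []
  | c :: cs =>
    match pvRLE cs with
    | [] => [(c, 1)]
    | (c', n) :: rest => if c' = c then (c, n + 1) :: rest else (c, 1) :: (c', n) :: rest

-- Source B's `backtrack(remaining)`; the `for entry in counts` loop is pvLoopB (by index, since
-- entries are updated in place).  `rem` is Source B's `remaining` argument.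
mutual
def pvBackB (rem : Nat) (counts : List (Char × Nat)) (path : List Char) (res : List String) : List String :=
  match rem with
  | 0 => res ++ [String.ofList path]
  | Nat.succ r => pvLoopB r counts path 0 res
termination_by (2 * rem, 0)

def pvLoopB (r : Nat) (counts : List (Char × Nat)) (path : List Char) (j : Nat) (res : List String) : List String :=
  if h : j < counts.length then
    let e := counts.getD j (' ', 0)
    let res' := if 0 < e.2 then pvBackB r (counts.set j (e.1, e.2 - 1)) (path ++ [e.1]) res else res
    pvLoopB r counts path (j + 1) res'
  else res
termination_by (2 * r + 1, counts.length - j)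
end

def generate_anagrams_alt (input_str : String) : List String :=
  let counts := pvRLE (PySem.List.sorted input_str.toList (fun c => c) false)
  pvBackB input_str.toList.length counts [] []

-- ===== PRECONDITION & SPEC =====
def Spec_generate_anagrams (input_str : String) (out : List String) : Prop := out = generate_anagrams_alt input_str
instance (input_str : String) (out : List String) : Decidable (Spec_generate_anagrams input_str out) := by unfold Spec_generate_anagrams; infer_instance

-- ===== CLAIM (what is proved, stated in full; the proofs are below) =====
def Claim_equal_generate_anagrams : Prop := ∀ (input_str : String), Dom_generate_anagrams input_str → Spec_generate_anagrams input_str (generate_anagrams input_str)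

-- ===== LEMMAS AND PROOFS =====

-- Proof-side abstraction: a "block state" describes A's (sorted chars, used mask) and B's
-- counts list at once.  A block (c, u, f) is a maximal run of the char c, of which the first
-- u occurrences are used and f are still free.
def sOf (st : List (Char × Nat × Nat)) : List Char :=
  st.flatMap (fun b => List.replicate (b.2.1 + b.2.2) b.1)
def uOf (st : List (Char × Nat × Nat)) : List Bool :=
  st.flatMap (fun b => List.replicate b.2.1 true ++ List.replicate b.2.2 false)
def cOf (st : List (Char × Nat × Nat)) : List (Char × Nat) :=
  st.map (fun b => (b.1, b.2.2))
def tuS (st : List (Char × Nat × Nat)) : Nat := (st.map (fun b => b.2.1)).sum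
def tfS (st : List (Char × Nat × Nat)) : Nat := (st.map (fun b => b.2.2)).sum
def InvB (st : List (Char × Nat × Nat)) : Prop :=
  List.IsChain (· ≠ ·) (st.map (fun b => b.1)) ∧ ∀ b ∈ st, 1 ≤ b.2.1 + b.2.2

lemma sOf_nil : sOf [] = [] := rfl
lemma sOf_cons (b st) : sOf (b :: st) = List.replicate (b.2.1 + b.2.2) b.1 ++ sOf st := rfl
lemma sOf_append (st1 st2) : sOf (st1 ++ st2) = sOf st1 ++ sOf st2 := by
  simp [sOf]
lemma uOf_cons (b st) : uOf (b :: st) = (List.replicate b.2.1 true ++ List.replicate b.2.2 false) ++ uOf st := by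
  simp [uOf]
lemma uOf_append (st1 st2) : uOf (st1 ++ st2) = uOf st1 ++ uOf st2 := by
  simp [uOf]
lemma cOf_append (st1 st2) : cOf (st1 ++ st2) = cOf st1 ++ cOf st2 := by
  simp [cOf]
lemma length_sOf (st) : (sOf st).length = tuS st + tfS st := by
  induction st with
  | nil => rfl
  | cons b st ih => simp [sOf_cons, tuS, tfS] at *; omega
lemma length_uOf (st) : (uOf st).length = tuS st + tfS st := by
  induction st with
  | nil => rfl
  | cons b st ih => simp [uOf_cons, tuS, tfS] at *; omega
lemma length_cOf (st) : (cOf st).length = st.length := by simp [cOf]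

lemma getD_shift {α} (d : α) (pre suf : List α) (q : Nat) :
    (pre ++ suf).getD (pre.length + q) d = suf.getD q d := by
  induction pre with
  | nil => simp
  | cons a pre ih => simpa [Nat.succ_add] using ih

lemma getD_replicate' {α} (d a : α) (n q : Nat) (h : q < n) :
    (List.replicate n a).getD q d = a := by
  induction n generalizing q with
  | zero => omega
  | succ n ih =>
    cases q with
    | zero => simp [List.replicate_succ]
    | succ q => simpa [List.replicate_succ] using ih q (by omega)

lemma getD_rep_append {α} (d a : α) (n q : Nat) (h : q < n) (suf : List α) :
    (List.replicate n a ++ suf).getD q d = a := by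
  rw [List.getD_append _ _ _ _ (by simpa using h)]
  exact getD_replicate' d a n q h

lemma set_shift {α} (pre suf : List α) (q : Nat) (x : α) :
    (pre ++ suf).set (pre.length + q) x = pre ++ suf.set q x := by
  induction pre with
  | nil => simp
  | cons a pre ih => simp [Nat.succ_add, ih]

-- fuel 0: the loop never changes the accumulator (every recursive call returns it unchanged)
lemma loopA_zero (s used path) : ∀ n i res, s.length - i ≤ n →
    pvLoopA 0 s used path i res = res := by
  intro n
  induction n with
  | zero =>
    intro i res h
    rw [pvLoopA]
    simp only [dif_neg (by omega : ¬ i < s.length)]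
  | succ n ih =>
    intro i res h
    rw [pvLoopA]
    by_cases hi : i < s.length
    · simp only [dif_pos hi]
      split_ifs
      · exact ih (i+1) res (by omega)
      · exact ih (i+1) res (by omega)
      · rw [pvBackA]; exact ih (i+1) res (by omega)
    · simp only [dif_neg hi]

-- skip lemma: a stretch of positions each of which A's loop skips leaves the accumulator alone
lemma loopA_skip (fuel : Nat) (s : List Char) (used : List Bool) (path : List Char) :
    ∀ (k i : Nat) (res : List String), i + k ≤ s.length →
    (∀ q, q < k → used.getD (i + q) false = true ∨
        (0 < i + q ∧ s.getD (i + q) ' ' = s.getD (i + q - 1) ' ' ∧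
         used.getD (i + q - 1) false = false ∧ used.getD (i + q) false = false)) →
    pvLoopA fuel s used path i res = pvLoopA fuel s used path (i + k) res := by
  intro k
  induction k with
  | zero => intro i res _ _; rfl
  | succ k ih =>
    intro i res hlen h
    rw [pvLoopA]
    simp only [dif_pos (by omega : i < s.length)]
    have h0 := h 0 (by omega)
    simp only [Nat.add_zero] at h0
    have hr : (if used.getD i false then res
        else if 0 < i ∧ s.getD i ' ' = s.getD (i - 1) ' ' ∧ used.getD (i - 1) false = false then res
        else pvBackA fuel s (used.set i true) (path ++ [s.getD i ' ']) res) = res := by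
      rcases h0 with h0 | ⟨h1, h2, h3, h4⟩
      · rw [if_pos h0]
      · rw [h4]
        simp only [Bool.false_eq_true, if_false]
        rw [if_pos (⟨h1, h2, h3⟩ : 0 < i ∧ s.getD i ' ' = s.getD (i - 1) ' ' ∧ used.getD (i - 1) false = false)]
    rw [hr]
    have := ih (i + 1) res (by omega) (fun q hq => by
      have := h (q + 1) (by omega)
      simpa [Nat.add_assoc, Nat.add_comm 1 q] using this)
    rw [this]
    ring_nf

-- the main loop correspondence, by induction on the unscanned suffix st2 of the block state
lemma cOf_cons (b st) : cOf (b :: st) = (b.1, b.2.2) :: cOf st := rfl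

lemma set_first_free {α} (t x : α) (u : Nat) (suf : List α) :
    (List.replicate u t ++ x :: suf).set u t = List.replicate (u + 1) t ++ suf := by
  induction u with
  | zero => simp
  | succ u ih => simpa [List.replicate_succ] using ih

lemma loop_eq (r : Nat)
    (IH : ∀ st path res, InvB st → tfS st = r → path.length = tuS st →
      pvBackA (r + 1) (sOf st) (uOf st) path res = pvBackB r (cOf st) path res) :
    ∀ (st2 st1 : List (Char × Nat × Nat)) (path : List Char) (res : List String),
    InvB (st1 ++ st2) → tfS (st1 ++ st2) = r + 1 → path.length = tuS (st1 ++ st2) →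
    (st2 = [] ∨ (sOf st1).length = 0 ∨
      (uOf (st1 ++ st2)).getD ((sOf st1).length - 1) false = true ∨
      (sOf (st1 ++ st2)).getD ((sOf st1).length - 1) ' ' ≠ (sOf (st1 ++ st2)).getD (sOf st1).length ' ') →
    pvLoopA (r + 1) (sOf (st1 ++ st2)) (uOf (st1 ++ st2)) path (sOf st1).length res
      = pvLoopB r (cOf (st1 ++ st2)) path st1.length res := by
  intro st2
  induction st2 with
  | nil =>
    intro st1 path res _ _ _ _
    rw [pvLoopA, pvLoopB]
    simp only [List.append_nil, length_cOf]
    rw [dif_neg (lt_irrefl _), dif_neg (lt_irrefl _)]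
  | cons b st2' ih2 =>
    obtain ⟨c, u, f⟩ := b
    intro st1 path res hInv htf hpath hNS
    have hS : sOf (st1 ++ ⟨c,u,f⟩ :: st2')
        = sOf st1 ++ (List.replicate (u+f) c ++ sOf st2') := by
      rw [sOf_append, sOf_cons]
    have hU : uOf (st1 ++ ⟨c,u,f⟩ :: st2')
        = uOf st1 ++ ((List.replicate u true ++ List.replicate f false) ++ uOf st2') := by
      rw [uOf_append, uOf_cons]
    have hC : cOf (st1 ++ ⟨c,u,f⟩ :: st2')
        = cOf st1 ++ ((c, f) :: cOf st2') := by
      rw [cOf_append, cOf_cons]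
    have hU1 : (uOf st1).length = (sOf st1).length := by rw [length_uOf, length_sOf]
    have hlenS : (sOf (st1 ++ ⟨c,u,f⟩ :: st2')).length
        = (sOf st1).length + (u + f) + (sOf st2').length := by
      rw [hS]; simp [List.length_append]; omega
    have hUat : ∀ q, q < u →
        (uOf (st1 ++ ⟨c,u,f⟩ :: st2')).getD ((sOf st1).length + q) false = true := by
      intro q hq
      rw [hU, ← hU1, getD_shift, List.append_assoc]
      exact getD_rep_append _ _ _ _ hq _
    have hUfree : ∀ q, q < f →
        (uOf (st1 ++ ⟨c,u,f⟩ :: st2')).getD ((sOf st1).length + (u + q)) false = false := by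
      intro q hq
      rw [hU, ← hU1, getD_shift, List.append_assoc]
      rw [show u + q = (List.replicate u (true : Bool)).length + q by simp, getD_shift]
      exact getD_rep_append _ _ _ _ hq _
    have hSat : ∀ q, q < u + f →
        (sOf (st1 ++ ⟨c,u,f⟩ :: st2')).getD ((sOf st1).length + q) ' ' = c := by
      intro q hq
      rw [hS, getD_shift]
      exact getD_rep_append _ _ _ _ hq _
    have hstep1 : pvLoopA (r+1) (sOf (st1 ++ ⟨c,u,f⟩ :: st2')) (uOf (st1 ++ ⟨c,u,f⟩ :: st2'))
          path (sOf st1).length res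
        = pvLoopA (r+1) (sOf (st1 ++ ⟨c,u,f⟩ :: st2')) (uOf (st1 ++ ⟨c,u,f⟩ :: st2'))
          path ((sOf st1).length + u) res := by
      exact loopA_skip _ _ _ _ u (sOf st1).length res (by omega)
        (fun q hq => Or.inl (hUat q hq))
    have hjlt : st1.length < (cOf (st1 ++ ⟨c,u,f⟩ :: st2')).length := by
      rw [length_cOf]; simp
    have hget : (cOf (st1 ++ ⟨c,u,f⟩ :: st2')).getD st1.length (' ', 0) = (c, f) := by
      rw [hC, show st1.length = (cOf st1).length + 0 by simp [length_cOf], getD_shift]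
      rfl
    -- the induction-hypothesis application that closes each branch, for the untouched block
    have hnext : ∀ (R : List String),
        pvLoopA (r+1) (sOf (st1 ++ ⟨c,u,f⟩ :: st2')) (uOf (st1 ++ ⟨c,u,f⟩ :: st2'))
          path ((sOf st1).length + (u + f)) R
        = pvLoopB r (cOf (st1 ++ ⟨c,u,f⟩ :: st2')) path (st1.length + 1) R := by
      intro R
      have hre : st1 ++ ⟨c,u,f⟩ :: st2' = (st1 ++ [⟨c,u,f⟩]) ++ st2' := by simp
      have hlen' : (sOf (st1 ++ [(⟨c,u,f⟩ : Char × Nat × Nat)])).length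
          = (sOf st1).length + (u + f) := by
        rw [sOf_append, List.length_append, length_sOf]
        simp [tuS, tfS, sOf]
      have hmem1 : 1 ≤ u + f := by
        have := hInv.2 ⟨c,u,f⟩ (by simp)
        simpa using this
      have hns' : st2' = [] ∨ (sOf (st1 ++ [(⟨c,u,f⟩ : Char × Nat × Nat)])).length = 0 ∨
          (uOf ((st1 ++ [⟨c,u,f⟩]) ++ st2')).getD
            ((sOf (st1 ++ [(⟨c,u,f⟩ : Char × Nat × Nat)])).length - 1) false = true ∨
          (sOf ((st1 ++ [⟨c,u,f⟩]) ++ st2')).getD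
            ((sOf (st1 ++ [(⟨c,u,f⟩ : Char × Nat × Nat)])).length - 1) ' '
            ≠ (sOf ((st1 ++ [⟨c,u,f⟩]) ++ st2')).getD
              (sOf (st1 ++ [(⟨c,u,f⟩ : Char × Nat × Nat)])).length ' ' := by
        cases st2' with
        | nil => exact Or.inl rfl
        | cons b2 rest =>
          obtain ⟨c2, u2, f2⟩ := b2
          rw [hlen', ← hre]
          cases f with
          | zero =>
            refine Or.inr (Or.inr (Or.inl ?_))
            have : (sOf st1).length + (u + 0) - 1 = (sOf st1).length + (u - 1) := by omega
            rw [this]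
            exact hUat (u - 1) (by omega)
          | succ f' =>
            refine Or.inr (Or.inr (Or.inr ?_))
            have e1 : (sOf st1).length + (u + (f' + 1)) - 1
                = (sOf st1).length + (u + f') := by omega
            rw [e1, hSat (u + f') (by omega)]
            -- the char at the start of the next block is c2, and c ≠ c2
            have hc2 : (sOf (st1 ++ ⟨c,u,f'+1⟩ :: (⟨c2,u2,f2⟩ :: rest))).getD
                ((sOf st1).length + (u + (f' + 1))) ' ' = c2 := by
              have hS2 : sOf (st1 ++ ⟨c,u,f'+1⟩ :: (⟨c2,u2,f2⟩ :: rest))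
                  = (sOf st1 ++ List.replicate (u+(f'+1)) c)
                    ++ (List.replicate (u2+f2) c2 ++ sOf rest) := by
                rw [sOf_append, sOf_cons, sOf_cons]
                simp [List.append_assoc]
              have hlenpre : (sOf st1 ++ List.replicate (u+(f'+1)) c).length
                  = (sOf st1).length + (u + (f' + 1)) := by simp
              rw [hS2, show (sOf st1).length + (u + (f' + 1))
                    = (sOf st1 ++ List.replicate (u+(f'+1)) c).length + 0 by omega,
                  getD_shift]
              have hmem2 : 1 ≤ u2 + f2 := by
                have := hInv.2 ⟨c2,u2,f2⟩ (by simp)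
                simpa using this
              exact getD_rep_append _ _ _ _ (by omega) _
            rw [hc2]
            have hchain := hInv.1
            simp only [List.map_append, List.map_cons] at hchain
            have := (hchain.right_of_append)
            rw [List.isChain_cons_cons] at this
            exact this.1
      have := ih2 (st1 ++ [⟨c,u,f⟩]) path R (hre ▸ hInv) (hre ▸ htf) (hre ▸ hpath) hns'
      rw [← hre, hlen'] at this
      simpa using this
    cases f with
    | zero =>
      have hu1 : 1 ≤ u := by
        have := hInv.2 ⟨c,u,0⟩ (by simp)
        simpa using this
      rw [hstep1, pvLoopB, dif_pos hjlt]
      simp only [hget]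
      norm_num
      have := hnext res
      simpa using this
    | succ f' =>
      -- one real step: A takes the first free slot of the block, B decrements its count
      have hplt : (sOf st1).length + u < (sOf (st1 ++ ⟨c,u,f'+1⟩ :: st2')).length := by
        rw [hlenS]; omega
      rw [hstep1, pvLoopA, dif_pos hplt]
      have hused : (uOf (st1 ++ ⟨c,u,f'+1⟩ :: st2')).getD ((sOf st1).length + u) false = false := by
        have := hUfree 0 (by omega)
        simpa using this
      rw [hused]
      simp only [Bool.false_eq_true, if_false]
      have hcond : ¬(0 < (sOf st1).length + u ∧
          (sOf (st1 ++ ⟨c,u,f'+1⟩ :: st2')).getD ((sOf st1).length + u) ' '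
            = (sOf (st1 ++ ⟨c,u,f'+1⟩ :: st2')).getD ((sOf st1).length + u - 1) ' ' ∧
          (uOf (st1 ++ ⟨c,u,f'+1⟩ :: st2')).getD ((sOf st1).length + u - 1) false = false) := by
        cases u with
        | succ u'' =>
          rintro ⟨-, -, h3⟩
          have : (sOf st1).length + (u'' + 1) - 1 = (sOf st1).length + u'' := by omega
          rw [this] at h3
          rw [hUat u'' (by omega)] at h3
          exact absurd h3 (by simp)
        | zero =>
          rcases hNS with hNS | hNS | hNS | hNS
          · exact absurd hNS (by simp)
          · rintro ⟨h1, -, -⟩; omega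
          · rintro ⟨-, -, h3⟩
            rw [show (sOf st1).length + 0 - 1 = (sOf st1).length - 1 by omega] at h3
            rw [hNS] at h3
            exact absurd h3 (by simp)
          · rintro ⟨h1, h2, -⟩
            rw [show (sOf st1).length + 0 - 1 = (sOf st1).length - 1 by omega] at h2
            rw [show (sOf st1).length + 0 = (sOf st1).length by omega] at h2
            exact hNS h2.symm
      rw [if_neg hcond]
      rw [hSat u (by omega)]
      -- identify A's recursive call with B's
      have hset : (uOf (st1 ++ ⟨c,u,f'+1⟩ :: st2')).set ((sOf st1).length + u) true
          = uOf (st1 ++ ⟨c,u+1,f'⟩ :: st2') := by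
        rw [hU, ← hU1, set_shift, List.replicate_succ, List.append_assoc,
            List.cons_append, set_first_free]
        rw [uOf_append, uOf_cons]
        simp [List.append_assoc]
      have hInv' : InvB (st1 ++ ⟨c,u+1,f'⟩ :: st2') := by
        constructor
        · have h1 := hInv.1
          simp only [List.map_append, List.map_cons] at h1 ⊢
          exact h1
        · intro b hb
          rcases List.mem_append.mp hb with hb | hb
          · exact hInv.2 b (List.mem_append_left _ hb)
          · rcases List.mem_cons.mp hb with rfl | hb
            · simp; omega
            · exact hInv.2 b (by simp [hb])
      have htf' : tfS (st1 ++ ⟨c,u+1,f'⟩ :: st2') = r := by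
        simp only [tfS, List.map_append, List.sum_append, List.map_cons, List.sum_cons] at htf ⊢
        omega
      have hpath' : (path ++ [c]).length = tuS (st1 ++ ⟨c,u+1,f'⟩ :: st2') := by
        simp only [tuS, List.map_append, List.sum_append, List.map_cons, List.sum_cons,
          List.length_append, List.length_cons, List.length_nil] at hpath ⊢
        omega
      have hrec := IH (st1 ++ ⟨c,u+1,f'⟩ :: st2') (path ++ [c]) res hInv' htf' hpath'
      have hs' : sOf (st1 ++ ⟨c,u+1,f'⟩ :: st2') = sOf (st1 ++ ⟨c,u,f'+1⟩ :: st2') := by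
        rw [sOf_append, sOf_cons, sOf_append, sOf_cons]
        rw [show u + 1 + f' = u + (f' + 1) by omega]
      have hcset : cOf (st1 ++ ⟨c,u+1,f'⟩ :: st2')
          = (cOf (st1 ++ ⟨c,u,f'+1⟩ :: st2')).set st1.length (c, f') := by
        rw [cOf_append, cOf_cons, cOf_append, cOf_cons,
            show st1.length = (cOf st1).length + 0 by simp [length_cOf], set_shift]
        rfl
      rw [hs', hcset] at hrec
      rw [← hset] at hrec
      -- B-side one step
      rw [pvLoopB, dif_pos hjlt]
      simp only [hget]
      norm_num
      rw [hrec]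
      -- skip the remaining f' duplicate free slots on the A side
      have hstep2 : ∀ (R : List String),
          pvLoopA (r+1) (sOf (st1 ++ ⟨c,u,f'+1⟩ :: st2')) (uOf (st1 ++ ⟨c,u,f'+1⟩ :: st2'))
            path ((sOf st1).length + u + 1) R
          = pvLoopA (r+1) (sOf (st1 ++ ⟨c,u,f'+1⟩ :: st2')) (uOf (st1 ++ ⟨c,u,f'+1⟩ :: st2'))
            path ((sOf st1).length + u + 1 + f') R := by
        intro R
        refine loopA_skip _ _ _ _ f' ((sOf st1).length + u + 1) R (by omega) ?_
        intro q hq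
        refine Or.inr ⟨by omega, ?_, ?_, ?_⟩
        · rw [show (sOf st1).length + u + 1 + q - 1 = (sOf st1).length + (u + q) by omega,
              show (sOf st1).length + u + 1 + q = (sOf st1).length + (u + 1 + q) by omega,
              hSat (u + 1 + q) (by omega), hSat (u + q) (by omega)]
        · rw [show (sOf st1).length + u + 1 + q - 1 = (sOf st1).length + (u + q) by omega]
          exact hUfree q (by omega)
        · rw [show (sOf st1).length + u + 1 + q = (sOf st1).length + (u + (q + 1)) by omega]
          exact hUfree (q + 1) (by omega)
      rw [hstep2]
      have := hnext (pvBackB r ((cOf (st1 ++ ⟨c,u,f'+1⟩ :: st2')).set st1.length (c, f'))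
        (path ++ [c]) res)
      rw [show (sOf st1).length + u + 1 + f' = (sOf st1).length + (u + (f' + 1)) by omega]
      exact this

lemma mainAB : ∀ (rem : Nat) (st : List (Char × Nat × Nat)) (path : List Char) (res : List String),
    InvB st → tfS st = rem → path.length = tuS st →
    pvBackA (rem + 1) (sOf st) (uOf st) path res = pvBackB rem (cOf st) path res := by
  intro rem
  induction rem with
  | zero =>
    intro st path res hInv htf hpath
    rw [pvBackA, pvBackB]
    have hl : path.length = (sOf st).length := by rw [length_sOf]; omega
    simp only [if_pos hl]
    exact loopA_zero _ _ _ (sOf st).length 0 _ (by omega)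
  | succ r ih =>
    intro st path res hInv htf hpath
    rw [pvBackA, pvBackB]
    have hl : ¬ path.length = (sOf st).length := by rw [length_sOf]; omega
    simp only [if_neg hl]
    have := loop_eq r ih st [] path res (by simpa using hInv) (by simpa using htf)
      (by simpa using hpath) (by right; left; rfl)
    simpa [sOf_nil] using this

-- run-length encoding facts
lemma rle_expand (l : List Char) : (pvRLE l).flatMap (fun e => List.replicate e.2 e.1) = l := by
  induction l with
  | nil => rfl
  | cons c cs ih =>
    rw [pvRLE]
    cases h : pvRLE cs with
    | nil => simp [h] at ih; simp [ih]
    | cons e rest =>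
      obtain ⟨c', n⟩ := e
      by_cases hc : c' = c
      · simp only [if_pos hc]
        rw [h] at ih
        simp only [List.flatMap_cons] at ih ⊢
        rw [List.replicate_succ]
        simp [← ih, hc]
      · simp only [if_neg hc]
        rw [h] at ih
        simp [List.flatMap_cons] at ih ⊢
        simp [ih]

lemma rle_chain (l : List Char) : List.IsChain (· ≠ ·) ((pvRLE l).map (fun e => e.1)) := by
  induction l with
  | nil => simp [pvRLE]
  | cons c cs ih =>
    rw [pvRLE]
    cases h : pvRLE cs with
    | nil => simp
    | cons e rest =>
      obtain ⟨c', n⟩ := e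
      rw [h] at ih
      by_cases hc : c' = c
      · simp only [if_pos hc]
        cases rest with
        | nil => simp
        | cons e2 r2 =>
          simp only [List.map_cons, List.isChain_cons_cons] at ih ⊢
          exact ⟨hc ▸ ih.1, ih.2⟩
      · simp only [if_neg hc]
        simp only [List.map_cons, List.isChain_cons_cons] at ih ⊢
        exact ⟨fun hcc => hc hcc.symm, ih⟩

lemma rle_pos (l : List Char) : ∀ e ∈ pvRLE l, 1 ≤ e.2 := by
  induction l with
  | nil => simp [pvRLE]
  | cons c cs ih =>
    rw [pvRLE]
    cases h : pvRLE cs with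
    | nil => simp
    | cons e rest =>
      obtain ⟨c', n⟩ := e
      rw [h] at ih
      by_cases hc : c' = c
      · simp only [if_pos hc]
        intro x hx
        simp only [List.mem_cons] at hx
        rcases hx with rfl | hx
        · simp
        · exact ih x (by simp [hx])
      · simp only [if_neg hc]
        intro x hx
        simp only [List.mem_cons] at hx
        rcases hx with rfl | rfl | hx
        · simp
        · exact ih _ (by simp)
        · exact ih x (by simp [hx])

def stInit (l : List Char) : List (Char × Nat × Nat) := (pvRLE l).map (fun e => (e.1, 0, e.2))

lemma sOf_stInit (l : List Char) : sOf (stInit l) = l := by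
  have := rle_expand l
  simp only [sOf, stInit, List.flatMap_map]
  simpa using this

lemma flatMap_rep_false (L : List (Char × Nat)) :
    L.flatMap (fun e => List.replicate e.2 (false : Bool))
      = List.replicate ((L.map (fun e => e.2)).sum) false := by
  induction L with
  | nil => rfl
  | cons e L ih =>
    rw [List.flatMap_cons, ih, List.map_cons, List.sum_cons, List.replicate_add]

lemma uOf_stInit (l : List Char) : uOf (stInit l) = List.replicate l.length false := by
  have h2 : ((pvRLE l).map (fun e => e.2)).sum = l.length := by
    conv_rhs => rw [← rle_expand l]
    rw [List.length_flatMap]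
    simp only [List.length_replicate]
  simp only [uOf, stInit, List.flatMap_map]
  simpa [flatMap_rep_false] using congrArg (fun n => List.replicate n false) h2

lemma cOf_stInit (l : List Char) : cOf (stInit l) = pvRLE l := by
  simp only [cOf, stInit, List.map_map]
  simp [Function.comp_def]

lemma tuS_stInit (l : List Char) : tuS (stInit l) = 0 := by
  simp only [tuS, stInit, List.map_map]
  simp [Function.comp_def]

lemma tfS_stInit (l : List Char) : tfS (stInit l) = l.length := by
  have := sOf_stInit l
  have h := length_sOf (stInit l)
  rw [this, tuS_stInit] at h
  omega

lemma InvB_stInit (l : List Char) : InvB (stInit l) := by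
  constructor
  · have := rle_chain l
    simpa [stInit, List.map_map, Function.comp] using this
  · intro b hb
    simp only [stInit, List.mem_map] at hb
    obtain ⟨e, he, rfl⟩ := hb
    have := rle_pos l e he
    simpa using this

-- ===== VERDICT (by name: the statement is the Claim_ definition above) =====
theorem generate_anagrams_spec : Claim_equal_generate_anagrams := by
  intro input_str _
  unfold Spec_generate_anagrams generate_anagrams generate_anagrams_alt
  by_cases h : input_str.toList = []
  · rw [h]
    rw [if_pos rfl]
    have hs : PySem.List.sorted ([] : List Char) (fun c => c) false = [] := by
      simp [PySem.List.sorted]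
    rw [hs]
    rw [pvRLE]
    simp only [List.length_nil]
    rw [pvBackB]
    decide
  · simp only [if_neg h]
    set l := PySem.List.sorted input_str.toList (fun c => c) false with hl
    have hlen : input_str.toList.length = l.length := by
      rw [hl, PySem.List.length_sorted]
    have := mainAB l.length (stInit l) [] []
      (InvB_stInit l) (tfS_stInit l) (by simp [tuS_stInit])
    rw [sOf_stInit, uOf_stInit, cOf_stInit] at this
    rw [hlen]
    exact this
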